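-- pv_equiv track=rewrite | github.com/kfrncs/reddit_classifier | clean_data.py | drop_punctuation
-- ===== SOURCE A (Python) =====
-- def drop_punctuation(in_list):
--     """ drop all the punctuation from a list of strings"""
--     out_list = in_list.copy()
--
--     for i in range(len(out_list)):
--         out_list[i] = out_list[i].replace('.', '').replace(',', '').replace('\'', '').replace('"', '')
--         out_list[i] = out_list[i].replace('/', '').replace('\\', '').replace('!', '').replace('‘', '')
--         out_list[i] = out_list[i].replace('“', '').replace('(', '').replace(')', '').replace('”', '')
--         out_list[i] = out_list[i].replace('?', '')
--         out_list[i] = out_list[i].replace(':', '').replace('’', '').lower()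
--
--     return out_list
-- ===== SOURCE B (Python) =====
-- _PUNCT = '.,\'"/\\!\u2018\u201c()\u201d?:\u2019'
-- _TABLE = str.maketrans('', '', _PUNCT)
--
--
-- def drop_punctuation(in_list):
--     """drop all the punctuation from a list of strings"""
--     return [s.translate(_TABLE).lower() for s in in_list]
-- ===== Notes on version B (the rewrite author's own statement) =====
-- stated objective: idiomatic
-- what changed: Replaces the index loop with 15 chained str.replace scans per string by a single table-driven deletion pass (str.maketrans/str.translate) in a list comprehension.
import Mathlib
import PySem

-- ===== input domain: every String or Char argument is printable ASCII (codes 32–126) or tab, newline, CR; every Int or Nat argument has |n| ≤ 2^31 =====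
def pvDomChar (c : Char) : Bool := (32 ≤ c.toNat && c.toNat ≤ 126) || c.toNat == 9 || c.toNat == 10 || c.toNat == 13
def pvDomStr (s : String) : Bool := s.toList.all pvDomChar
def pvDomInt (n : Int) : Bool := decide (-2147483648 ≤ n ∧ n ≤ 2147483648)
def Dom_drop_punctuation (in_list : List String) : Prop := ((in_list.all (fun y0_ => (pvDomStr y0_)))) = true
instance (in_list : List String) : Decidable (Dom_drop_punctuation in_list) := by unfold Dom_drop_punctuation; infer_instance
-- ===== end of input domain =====

-- B replaces A's per-index loop of 15 chained .replace deletion scans by one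
-- table-driven deletion pass (filter against the punctuation set) per string — idiomatic.


-- ===== PORT A =====
-- A copies the list and rewrites each slot in place; per slot it chains 15
-- .replace(ch, '') calls (one helper per Python source line) and lowercases last.
def dropPunctA1 (s : String) : String :=
  PySem.Str.replace (PySem.Str.replace (PySem.Str.replace (PySem.Str.replace s "." "") "," "") "'" "") "\"" ""

def dropPunctA2 (s : String) : String :=
  PySem.Str.replace (PySem.Str.replace (PySem.Str.replace (PySem.Str.replace (dropPunctA1 s) "/" "") "\\" "") "!" "") "‘" ""

def dropPunctA3 (s : String) : String :=
  PySem.Str.replace (PySem.Str.replace (PySem.Str.replace (PySem.Str.replace (dropPunctA2 s) "“" "") "(" "") ")" "") "”" ""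

def dropPunctA4 (s : String) : String :=
  PySem.Str.replace (dropPunctA3 s) "?" ""

def dropPunctA5 (s : String) : String :=
  PySem.Str.lower (PySem.Str.replace (PySem.Str.replace (dropPunctA4 s) ":" "") "’" "")

def drop_punctuation (in_list : List String) : List String :=
  in_list.map dropPunctA5

-- ===== PORT B =====
-- the exact character set A deletes (Source B's _PUNCT), in the same order
def pvPUNCT : List Char := ['.', ',', '\'', '"', '/', '\\', '!', '‘', '“', '(', ')', '”', '?', ':', '’']

-- s.translate(deletion table) keeps exactly the chars not in pvPUNCT; then .lower()
def drop_punctuation_alt (in_list : List String) : List String :=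
  in_list.map (fun s => PySem.Str.lower (String.ofList (s.toList.filter (fun c => !pvPUNCT.contains c))))

-- ===== PRECONDITION & SPEC =====
def Spec_drop_punctuation (in_list : List String) (out : List String) : Prop := out = drop_punctuation_alt in_list
instance (in_list : List String) (out : List String) : Decidable (Spec_drop_punctuation in_list out) := by unfold Spec_drop_punctuation; infer_instance

-- ===== CLAIM (what is proved, stated in full; the proofs are below) =====
def Claim_equal_drop_punctuation : Prop := ∀ (in_list : List String), Dom_drop_punctuation in_list → Spec_drop_punctuation in_list (drop_punctuation in_list)

-- ===== LEMMAS AND PROOFS =====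

-- replace.go with a single-char pattern and empty replacement deletes every occurrence
theorem go_single (c : Char) (l acc : List Char) (fuel : Nat) (h : l.length ≤ fuel) :
    PySem.Chars.replace.go [c] [] fuel l acc = acc.reverse ++ l.filter (· != c) := by
  induction l generalizing fuel acc with
  | nil => cases fuel <;> simp [PySem.Chars.replace.go]
  | cons x t ih =>
    cases fuel with
    | zero => simp at h
    | succ n =>
      have ht : t.length ≤ n := by simpa using h
      simp only [PySem.Chars.replace.go]
      show (if List.isPrefixOf [c] (x::t) = true then _ else _) = _
      have hp : List.isPrefixOf [c] (x::t) = (c == x) := by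
        show ((c == x) && List.isPrefixOf [] t) = (c == x); simp
      rw [hp]
      by_cases hc : c = x
      · subst hc
        simp only [beq_self_eq_true, if_true]
        show PySem.Chars.replace.go [c] [] n (List.drop 1 (c :: t)) ([].reverse ++ acc) = _
        rw [show List.drop 1 (c :: t) = t from rfl,
          show ([].reverse ++ acc : List Char) = acc from by simp, ih acc n ht]
        simp
      · have hb : (c == x) = false := by simp [hc]
        rw [hb, if_neg (by simp)]
        rw [ih (x :: acc) n ht]
        simp [bne, beq_eq_false_iff_ne, Ne.symm hc]

-- s.replace(c, '') on char lists is a filter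
theorem replace_single (s : List Char) (c : Char) :
    PySem.Chars.replace s [c] [] = s.filter (· != c) := by
  simp [PySem.Chars.replace, go_single c s [] s.length (le_refl _)]

-- the per-string chain of A equals B's single filter-then-lower
theorem dropPunctA5_eq (s : String) :
    dropPunctA5 s = PySem.Str.lower (String.ofList (s.toList.filter (fun c => !pvPUNCT.contains c))) := by
  have h : (PySem.Str.replace (PySem.Str.replace (dropPunctA4 s) ":" "") "’" "").toList
      = s.toList.filter (fun c => !pvPUNCT.contains c) := by
    simp only [dropPunctA4, dropPunctA3, dropPunctA2, dropPunctA1,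
      PySem.Str.toList_replace]
    simp only [show ("." : String).toList = ['.'] from rfl,
      show ("," : String).toList = [','] from rfl,
      show ("'" : String).toList = ['\''] from rfl,
      show ("\"" : String).toList = ['"'] from rfl,
      show ("/" : String).toList = ['/'] from rfl,
      show ("\\" : String).toList = ['\\'] from rfl,
      show ("!" : String).toList = ['!'] from rfl,
      show ("‘" : String).toList = ['‘'] from rfl,
      show ("“" : String).toList = ['“'] from rfl,
      show ("(" : String).toList = ['('] from rfl,
      show (")" : String).toList = [')'] from rfl,
      show ("”" : String).toList = ['”'] from rfl,
      show ("?" : String).toList = ['?'] from rfl,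
      show (":" : String).toList = [':'] from rfl,
      show ("’" : String).toList = ['’'] from rfl,
      show ("" : String).toList = ([] : List Char) from rfl]
    simp only [replace_single]
    simp [List.filter_filter, pvPUNCT, Bool.not_or]
    ac_rfl
  apply String.toList_inj.mp
  rw [dropPunctA5, PySem.Str.toList_lower, PySem.Str.toList_lower, h, String.toList_ofList]

-- ===== VERDICT (by name: the statement is the Claim_ definition above) =====
theorem drop_punctuation_spec : Claim_equal_drop_punctuation := by
  intro in_list _
  unfold Spec_drop_punctuation drop_punctuation drop_punctuation_alt
  exact List.map_congr_left (fun s _ => dropPunctA5_eq s)
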